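-- pv_equiv track=rewrite | github.com/eaindome/Programming | Advent_of_Code/2020/Day-20/trials/trial-2.py | find_matching_borders
-- ===== SOURCE A (Python) =====
-- def find_matching_borders(tiles, tile1_id, tile2_id):
--     """
--     Compare the borders of two tiles to find matching edges.
--
--     Arguments:
--     - tiles: A dictionary containing tile data
--     - tile1_id: ID of the first tile
--     - tile2_id: ID of the second tile
--
--     Returns:
--     - None if not matching border is found
--     - A tuple(edge1, edge2) if matching borders are found,
--       where edge1 is the matching edge of tile1,
--       and edge2 is the matching edge of tile2
--     """
--     tile1 = tiles[tile1_id]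
--     tile2 = tiles[tile2_id]
--
--     # compare the top edge of tile1 with all edges of tile2
--     for i in range(4):
--         edge1 = tile1[0]
--         edge2 = tile2[0][::-1]      # reverse edge2 for comparison
--         if edge1 == edge2:
--             return(edge1, edge2)
--
--         # rotate tile2 90 degrees clockwise for next comparison
--         tile2 = ["".join(row) for row in zip(*tile2[::-1])]
--
--     # if no matching border is found, return none
--     return None
-- ===== SOURCE B (Python) =====
-- def find_matching_borders(tiles, tile1_id, tile2_id):
--     tile1 = tiles[tile1_id]
--     tile2 = tiles[tile2_id]
--     top = tile1[0]
--     if top == tile2[0][::-1]: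
--         return (top, top)
--     # one clockwise rotation yields a rectangular grid (zip trims ragged rows);
--     # its three relevant edges are then read directly instead of rotating again
--     rect = ["".join(row) for row in zip(*tile2[::-1])]
--     for cand in (rect[0][::-1],                       # top of the rotation, reversed
--                  "".join(row[0] for row in rect),     # its left column
--                  rect[-1]):                           # its bottom row
--         if top == cand:
--             return (top, cand)
--     return None
-- ===== Notes on version B (the rewrite author's own statement) =====
-- stated objective: alternative
-- what changed: B replaces A's four-way rotate-and-compare loop by a single rotation (which makes the grid rectangular) followed by reading the three remaining candidate edges directly off that rectangle; Pre_ excludes only inputs on which A raises (missing id, empty tile, or an empty row emptying the rotation before a match).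
import Mathlib
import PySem

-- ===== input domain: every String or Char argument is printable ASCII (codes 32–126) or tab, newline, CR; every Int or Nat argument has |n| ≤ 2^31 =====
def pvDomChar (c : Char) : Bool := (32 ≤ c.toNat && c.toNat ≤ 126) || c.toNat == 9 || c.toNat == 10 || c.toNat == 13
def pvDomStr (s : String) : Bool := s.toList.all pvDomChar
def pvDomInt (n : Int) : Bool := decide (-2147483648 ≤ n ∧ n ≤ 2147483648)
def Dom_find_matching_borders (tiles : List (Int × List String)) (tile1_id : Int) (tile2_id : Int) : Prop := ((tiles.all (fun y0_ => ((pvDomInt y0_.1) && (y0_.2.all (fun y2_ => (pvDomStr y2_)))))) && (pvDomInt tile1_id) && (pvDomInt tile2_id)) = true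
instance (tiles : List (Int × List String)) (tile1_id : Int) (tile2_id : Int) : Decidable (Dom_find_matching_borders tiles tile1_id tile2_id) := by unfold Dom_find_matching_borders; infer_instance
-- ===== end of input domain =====

-- B rotates tile2 once (making it rectangular) and reads the remaining three candidate edges
-- directly off that rectangle, instead of rotating the whole grid three more times.

-- ===== PORT A =====
-- zip(*rows): tuples of the j-th elements, j up to the minimum row length (zip() of no iterables is empty)
def pvCol (rows : List (List Char)) (j : Nat) : List Char := rows.map (fun r => r.getD j ' ')
def pvZipStar (rows : List (List Char)) : List (List Char) :=
  match (rows.map List.length).min? with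
  | none => []
  | some m => (List.range m).map (fun j => pvCol rows j)
-- ["".join(row) for row in zip(*tile2[::-1])]   (rotate 90° clockwise)
def pvRotate (t : List String) : List String :=
  (pvZipStar ((t.reverse).map String.toList)).map String.ofList
-- the 'for i in range(4)' loop; tile1[0] / tile2[0] are headD (Pre_ guarantees nonempty where reached)
def pvLoopA (tile1 : List String) (tile2 : List String) : Nat → Option (String × String)
  | 0 => none
  | Nat.succ k =>
    let edge1 := tile1.headD ""
    let edge2 := String.ofList ((tile2.headD "").toList.reverse)   -- tile2[0][::-1]
    if edge1 = edge2 then some (edge1, edge2)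
    else pvLoopA tile1 (pvRotate tile2) k

def find_matching_borders (tiles : List (Int × List String)) (tile1_id : Int) (tile2_id : Int) : Option (String × String) :=
  let d := PySem.Dict.ofList tiles
  pvLoopA (d.getD tile1_id []) (d.getD tile2_id []) 4

-- ===== PORT B =====
def find_matching_borders_alt (tiles : List (Int × List String)) (tile1_id : Int) (tile2_id : Int) : Option (String × String) :=
  let d := PySem.Dict.ofList tiles
  let tile1 := d.getD tile1_id []
  let tile2 := d.getD tile2_id []
  let top := tile1.headD ""                                                   -- tile1[0]
  if top = String.ofList ((tile2.headD "").toList.reverse) then some (top, top)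
  else
    let rect := pvRotate tile2                                                -- one clockwise zip-rotation
    match [String.ofList ((rect.headD "").toList.reverse),                    -- rect[0][::-1]
           String.ofList (rect.map (fun r => r.toList.headD ' ')),            -- left column of rect
           rect.getLastD ""                                                   -- bottom row of rect
          ].find? (fun c => top == c) with
    | some c => some (top, c)
    | none => none

-- ===== PRECONDITION & SPEC =====
-- Pre_ is exactly where the Python A returns: both ids present (else KeyError), both tiles nonempty
-- (else IndexError), and either the very first comparison matches or every row of tile2 is nonempty
-- (otherwise a rotation becomes empty and tile2[0] raises IndexError).
def Pre_find_matching_borders (tiles : List (Int × List String)) (tile1_id : Int) (tile2_id : Int) : Prop :=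
  let d := PySem.Dict.ofList tiles
  (d.get? tile1_id).isSome = true ∧ (d.get? tile2_id).isSome = true ∧
  d.getD tile1_id [] ≠ [] ∧ d.getD tile2_id [] ≠ [] ∧
  ((d.getD tile1_id []).headD "" = String.ofList (((d.getD tile2_id []).headD "").toList.reverse)
    ∨ ∀ r ∈ d.getD tile2_id [], r ≠ "")
instance (tiles : List (Int × List String)) (tile1_id : Int) (tile2_id : Int) : Decidable (Pre_find_matching_borders tiles tile1_id tile2_id) := by unfold Pre_find_matching_borders; infer_instance

def pvWitness_find_matching_borders : (List (Int × List String)) × Int × Int :=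
  ([(1, ["ab", "cd"]), (2, ["ba", "xy"])], 1, 2)

def Spec_find_matching_borders (tiles : List (Int × List String)) (tile1_id : Int) (tile2_id : Int) (out : Option (String × String)) : Prop := out = find_matching_borders_alt tiles tile1_id tile2_id
instance (tiles : List (Int × List String)) (tile1_id : Int) (tile2_id : Int) (out : Option (String × String)) : Decidable (Spec_find_matching_borders tiles tile1_id tile2_id out) := by unfold Spec_find_matching_borders; infer_instance

-- ===== CLAIM (what is proved, stated in full; the proofs are below) =====
def Claim_equal_find_matching_borders : Prop := ∀ (tiles : List (Int × List String)) (tile1_id : Int) (tile2_id : Int), Dom_find_matching_borders tiles tile1_id tile2_id → Pre_find_matching_borders tiles tile1_id tile2_id → Spec_find_matching_borders tiles tile1_id tile2_id (find_matching_borders tiles tile1_id tile2_id)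

-- ===== LEMMAS AND PROOFS =====

theorem pv_min?_reverse (l : List Nat) : (l.reverse).min? = l.min? := by
  rcases h : l.min? with _ | a
  · simp only [List.min?_eq_none_iff] at h; simp [h]
  · rw [List.min?_eq_some_iff] at h ⊢
    exact ⟨by simp [h.1], fun b hb => h.2 b (by simpa using hb)⟩

theorem pv_getD_zero {α : Type} (l : List α) (d : α) : l.getD 0 d = l.headD d := by cases l <;> simp

theorem pv_headD_reverse {α : Type} (l : List α) (d : α) : (l.reverse).headD d = l.getLastD d := by
  cases h : l.reverse with
  | nil => simp_all [List.reverse_eq_nil_iff]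
  | cons a t =>
    have : l = (a :: t).reverse := by rw [← h, List.reverse_reverse]
    subst this; simp

theorem pv_headD_map {α β : Type} (f : α → β) (l : List α) (d : β) (x : α) (hl : l ≠ []) :
    (l.map f).headD d = f (l.headD x) := by
  cases l with
  | nil => simp at hl
  | cons a t => simp

theorem pv_headD_range_map {α : Type} (f : Nat → α) (d : α) {m : Nat} (h : 0 < m) :
    ((List.range m).map f).headD d = f 0 := by
  cases m with
  | zero => omega
  | succ n => rw [List.range_succ_eq_map]; simp

theorem pv_headD_ofList_range (g : Nat → List Char) {m : Nat} (h : 0 < m) :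
    ((((List.range m).map g)).map String.ofList).headD "" = String.ofList (g 0) := by
  have hne : (List.range m).map g ≠ [] := by simp [List.range_eq_nil]; omega
  rw [pv_headD_map _ _ _ [] hne, pv_headD_range_map _ _ h]

theorem pv_range_map_getD {α : Type} (d : α) (L : List α) {m : Nat} (h : m ≤ L.length) :
    (List.range m).map (fun j => L.getD j d) = L.take m := by
  induction m with
  | zero => simp
  | succ n ih =>
    rw [List.range_succ, List.map_append, ih (by omega), List.take_add_one]
    simp [List.getD, List.getElem?_eq_getElem (by omega : n < L.length)]

-- rotation closed form
theorem pv_rot1 (t : List String) {m : Nat}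
    (hm : (t.map (fun r => r.toList.length)).min? = some m) :
    pvRotate t = ((List.range m).map (fun j => pvCol ((t.reverse).map String.toList) j)).map String.ofList := by
  unfold pvRotate pvZipStar
  rw [show ((t.reverse).map String.toList).map List.length = (t.map (fun r => r.toList.length)).reverse by
    simp [List.map_reverse, List.map_map]]
  rw [pv_min?_reverse, hm]

theorem pv_top1 (t : List String) {m : Nat}
    (hm : (t.map (fun r => r.toList.length)).min? = some m) (hm1 : 0 < m) :
    ((pvRotate t).headD "").toList.reverse = t.map (fun r => r.toList.headD ' ') := by
  rw [pv_rot1 t hm, pv_headD_ofList_range _ hm1]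
  unfold pvCol
  rw [String.toList_ofList, List.map_map, ← List.map_reverse, List.reverse_reverse]
  simp [← List.head?_eq_getElem?]

theorem pv_zipStar_eq (rows : List (List Char)) {m : Nat}
    (h : (rows.map List.length).min? = some m) :
    pvZipStar rows = (List.range m).map (fun j => pvCol rows j) := by
  unfold pvZipStar; rw [h]

theorem pv_rotate_ofList (rs : List (List Char)) :
    pvRotate (rs.map String.ofList) = (pvZipStar rs.reverse).map String.ofList := by
  unfold pvRotate
  rw [← List.map_reverse, List.map_map]
  simp [Function.comp_def, String.toList_ofList]

theorem pv_col_length (rows : List (List Char)) (j : Nat) : (pvCol rows j).length = rows.length := by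
  simp [pvCol]

theorem pv_map_const {α β : Type} (l : List α) (c : β) : l.map (fun _ => c) = List.replicate l.length c := by
  induction l with
  | nil => simp
  | cons a t ih => simp [ih, List.replicate_succ]

theorem pv_len2 (t : List String) {m : Nat} (hm1 : 0 < m) :
    ((((List.range m).map (fun j => pvCol ((t.reverse).map String.toList) j)).reverse).map List.length).min? = some t.length := by
  have : (((List.range m).map (fun j => pvCol ((t.reverse).map String.toList) j)).reverse).map List.length = List.replicate m t.length := by
    rw [← List.map_reverse, List.map_map]
    simp only [Function.comp_def, pv_col_length]
    rw [show ((List.range m).reverse).map (fun j => ((t.reverse).map String.toList).length) = List.replicate ((List.range m).reverse).length (((t.reverse).map String.toList).length) from pv_map_const _ _]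
    simp only [List.length_reverse, List.length_range, List.length_map]
  rw [this]
  exact List.min?_replicate_of_pos hm1

theorem pv_top2 (t : List String) {m : Nat}
    (hm : (t.map (fun r => r.toList.length)).min? = some m) (hm1 : 0 < m) (h2 : t ≠ [])
    (hlast : m ≤ (t.getLastD "").toList.length) :
    ((pvRotate (pvRotate t)).headD "").toList.reverse = (t.getLastD "").toList.take m := by
  have hn : 0 < t.length := List.length_pos_iff.mpr h2
  have hr1 : (t.reverse).map String.toList ≠ [] := by simp [h2]
  rw [pv_rot1 t hm, pv_rotate_ofList]
  rw [pv_zipStar_eq _ (pv_len2 t hm1)]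
  rw [pv_headD_ofList_range _ hn, String.toList_ofList]
  have hcell : ∀ j : Nat, (pvCol ((t.reverse).map String.toList) j).getD 0 ' ' = (t.getLastD "").toList.getD j ' ' := by
    intro j
    rw [pvCol, pv_getD_zero, pv_headD_map _ _ _ [] hr1, pv_headD_map _ _ _ "" (by simp [h2]), pv_headD_reverse]
  rw [show pvCol (((List.range m).map (fun j => pvCol ((t.reverse).map String.toList) j)).reverse) 0 = ((List.range m).map (fun j => (pvCol ((t.reverse).map String.toList) j).getD 0 ' ')).reverse from by rw [pvCol, ← List.map_reverse, List.map_map]; simp [Function.comp_def, List.map_reverse]]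
  rw [List.reverse_reverse]
  simp only [hcell]
  exact pv_range_map_getD ' ' _ hlast

theorem pv_getLastD_mem {α : Type} (l : List α) (d : α) (h : l ≠ []) : l.getLastD d ∈ l := by
  cases l with
  | nil => exact absurd rfl h
  | cons a t =>
    cases t with
    | nil => simp
    | cons b t' =>
      rcases List.mem_cons.mp (@List.getLastD_mem_cons α (b :: t') a) with h' | h'
      · rw [show (a :: b :: t').getLastD d = (b :: t').getLastD a from rfl, h']
        exact List.mem_cons_self
      · exact List.mem_cons_of_mem a (by rw [show (a :: b :: t').getLastD d = (b :: t').getLastD a from rfl]; exact h')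

theorem pv_min_const (t : List String) {w : Nat} (h2 : t ≠ [])
    (hrect : ∀ r ∈ t, r.toList.length = w) :
    (t.map (fun r => r.toList.length)).min? = some w := by
  rw [List.min?_eq_some_iff]
  constructor
  · rw [List.mem_map]
    exact ⟨t.headD "", by cases t with | nil => exact absurd rfl h2 | cons a s => exact List.mem_cons_self, by cases t with | nil => exact absurd rfl h2 | cons a s => exact hrect a List.mem_cons_self⟩
  · intro b hb
    rw [List.mem_map] at hb
    obtain ⟨r, hr, hrb⟩ := hb
    rw [← hrb, hrect r hr]

theorem pv_loopA3 (tile1 g : List String) :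
    pvLoopA tile1 g 3 =
      (if tile1.headD "" = String.ofList ((g.headD "").toList.reverse) then
         some (tile1.headD "", String.ofList ((g.headD "").toList.reverse))
       else if tile1.headD "" = String.ofList (((pvRotate g).headD "").toList.reverse) then
         some (tile1.headD "", String.ofList (((pvRotate g).headD "").toList.reverse))
       else if tile1.headD "" = String.ofList (((pvRotate (pvRotate g)).headD "").toList.reverse) then
         some (tile1.headD "", String.ofList (((pvRotate (pvRotate g)).headD "").toList.reverse))
       else none) := rfl

theorem pv_find3 (top c1 c2 c3 : String) :
    (match [c1, c2, c3].find? (fun c => top == c) with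
     | some c => some (top, c)
     | none => (none : Option (String × String))) =
    (if top = c1 then some (top, c1) else if top = c2 then some (top, c2)
     else if top = c3 then some (top, c3) else none) := by
  cases h1 : top == c1 <;> cases h2 : top == c2 <;> cases h3 : top == c3 <;>
    simp only [List.find?, h1, h2, h3] <;> simp_all

-- on a nonempty rectangular grid g of positive width, the remaining three comparisons of A's
-- loop are against g's top (reversed), left column and bottom row
theorem pv_loop3_rect (tile1 g : List String) {w : Nat} (hg : g ≠ []) (hw : 0 < w)
    (hrect : ∀ r ∈ g, r.toList.length = w) :
    pvLoopA tile1 g 3 =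
      (match [String.ofList ((g.headD "").toList.reverse),
              String.ofList (g.map (fun r => r.toList.headD ' ')),
              g.getLastD ""].find? (fun c => tile1.headD "" == c) with
       | some c => some (tile1.headD "", c)
       | none => none) := by
  have hm : (g.map (fun r => r.toList.length)).min? = some w := pv_min_const g hg hrect
  have hlastlen : (g.getLastD "").toList.length = w := hrect _ (pv_getLastD_mem g "" hg)
  have e2 : String.ofList (((pvRotate g).headD "").toList.reverse)
      = String.ofList (g.map (fun r => r.toList.headD ' ')) := by rw [pv_top1 g hm hw]
  have e3 : String.ofList (((pvRotate (pvRotate g)).headD "").toList.reverse)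
      = g.getLastD "" := by
    rw [pv_top2 g hm hw hg (le_of_eq hlastlen.symm), ← hlastlen, List.take_length]
    exact String.ofList_toList
  rw [pv_loopA3, e2, e3, pv_find3]

-- the rotation of a grid with all rows nonempty is a nonempty rectangle of width t.length
theorem pv_rect_facts (t : List String) (h2 : t ≠ []) (hrows : ∀ r ∈ t, r ≠ "") :
    pvRotate t ≠ [] ∧ (∀ r ∈ pvRotate t, r.toList.length = t.length) := by
  obtain ⟨m, hm⟩ : ∃ m, (t.map (fun r => r.toList.length)).min? = some m := by
    rcases h : (t.map (fun r => r.toList.length)).min? with _ | m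
    · rw [List.min?_eq_none_iff] at h; simp [h2] at h
    · exact ⟨m, h⟩
  have hm1 : 0 < m := by
    obtain ⟨r, hr, hrm⟩ := List.mem_map.mp (List.min?_eq_some_iff.mp hm).1
    have : r.toList ≠ [] := fun hnil => hrows r hr (String.toList_eq_nil_iff.mp hnil)
    rw [← hrm]
    exact List.length_pos_iff.mpr this
  rw [pv_rot1 t hm]
  refine ⟨by simp [List.range_eq_nil]; omega, ?_⟩
  intro r hr
  obtain ⟨c, hc, hcr⟩ := List.mem_map.mp hr
  obtain ⟨j, _, hj⟩ := List.mem_map.mp hc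
  rw [← hcr, String.toList_ofList, ← hj, pv_col_length]
  simp

-- ===== VERDICT (by name: the statement is the Claim_ definition above) =====
theorem find_matching_borders_spec : Claim_equal_find_matching_borders := by
  intro tiles id1 id2 _ hpre
  unfold Spec_find_matching_borders find_matching_borders find_matching_borders_alt
  obtain ⟨_, _, h1, h2, hd⟩ := hpre
  by_cases h0 : (((PySem.Dict.ofList tiles).getD id1 []).headD "") =
      String.ofList ((((PySem.Dict.ofList tiles).getD id2 []).headD "").toList.reverse)
  · simp only [pvLoopA]
    rw [if_pos h0, if_pos h0, ← h0]
  · have hrows : ∀ r ∈ (PySem.Dict.ofList tiles).getD id2 [], r ≠ "" := hd.resolve_left h0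
    obtain ⟨hne, hrect⟩ := pv_rect_facts _ h2 hrows
    have hw : 0 < ((PySem.Dict.ofList tiles).getD id2 []).length := List.length_pos_iff.mpr h2
    simp only [pvLoopA, if_neg h0]
    have h := pv_loop3_rect ((PySem.Dict.ofList tiles).getD id1 []) _ hne hw hrect
    rw [pv_loopA3] at h
    exact h
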